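-- pv_equiv track=rewrite | github.com/MajaWroblewska/PYTHON_projekty | srednie/CODEWARS/kata 5=8p/Sum of pairs+Jana.py | shorten_list
-- ===== SOURCE A (Python) =====
-- def shorten_list(ints):
--     seen_once, seen_twice = set(), set()
--     for i in ints:
--         if i not in seen_once:
--             seen_once.add(i)
--             yield i
--         elif i not in seen_twice:
--             seen_twice.add(i)
--             yield i
-- ===== SOURCE B (Python) =====
-- def shorten_list(ints):
--     # Staged algorithm: precompute every value's full list of positions,
--     # then keep exactly the elements standing at one of the first two
--     # positions recorded for their value.
--     positions = {}
--     for j, x in enumerate(ints):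
--         positions.setdefault(x, []).append(j)
--     for j, x in enumerate(ints):
--         if j in positions[x][:2]:
--             yield x
-- ===== Notes on version B (the rewrite author's own statement) =====
-- stated objective: alternative
-- what changed: Replaces A's stateful single pass over two seen-sets with a staged algorithm: one pass precomputes each value's complete list of positions, a second pass keeps an element iff its index is among the first two recorded positions of its value.
import Mathlib
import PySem

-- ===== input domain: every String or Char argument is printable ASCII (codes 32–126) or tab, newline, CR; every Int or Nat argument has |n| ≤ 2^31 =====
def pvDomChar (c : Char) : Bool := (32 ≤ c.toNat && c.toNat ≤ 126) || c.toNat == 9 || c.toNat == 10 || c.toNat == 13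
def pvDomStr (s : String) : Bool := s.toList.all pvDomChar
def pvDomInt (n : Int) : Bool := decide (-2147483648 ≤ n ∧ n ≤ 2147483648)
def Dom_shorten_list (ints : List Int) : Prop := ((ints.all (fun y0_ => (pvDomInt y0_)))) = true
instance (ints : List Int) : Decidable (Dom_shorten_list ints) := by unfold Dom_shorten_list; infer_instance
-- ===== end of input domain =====

-- B replaces A's stateful one-pass two-set scan by a staged algorithm: pass 1 indexes every
-- value's full list of positions, pass 2 keeps an element iff its index is among the first two
-- positions recorded for its value (alternative decomposition, same cost). A and B are Python
-- generators; the equivalence is about the list of yielded values.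

-- ===== PORT A =====
-- step of A's loop: state = (seen_once, seen_twice, yielded so far)
def shorten_listStep (st : PySem.Set Int × PySem.Set Int × List Int) (i : Int) :
    PySem.Set Int × PySem.Set Int × List Int :=
  if ¬ st.1.contains i then (st.1.add i, st.2.1, st.2.2 ++ [i])
  else if ¬ st.2.1.contains i then (st.1, st.2.1.add i, st.2.2 ++ [i])
  else st

def shorten_list (ints : List Int) : List Int :=
  (ints.foldl shorten_listStep (PySem.Set.empty, PySem.Set.empty, [])).2.2

-- ===== PORT B =====
-- pass 1: positions.setdefault(x, []).append(j)
def shorten_listAltIndex (ints : List Int) : PySem.Dict Int (List Int) :=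
  (PySem.List.enumerate ints).foldl (fun d p => d.modify p.2 [] (fun l => l ++ [p.1]))
    PySem.Dict.empty

-- pass 2: yield x when j in positions[x][:2]  (positions[x][:2] is PySem.List.slice _ none (some 2))
def shorten_list_alt (ints : List Int) : List Int :=
  let positions := shorten_listAltIndex ints
  (PySem.List.enumerate ints).foldl
    (fun out p =>
      if (PySem.List.slice (positions.getD p.2 []) none (some 2)).contains p.1 then
        out ++ [p.2]
      else out) []

-- ===== PRECONDITION & SPEC =====
def Spec_shorten_list (ints : List Int) (out : List Int) : Prop := out = shorten_list_alt ints
instance (ints : List Int) (out : List Int) : Decidable (Spec_shorten_list ints out) := by unfold Spec_shorten_list; infer_instance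

-- ===== CLAIM (what is proved, stated in full; the proofs are below) =====
def Claim_equal_shorten_list : Prop := ∀ (ints : List Int), Dom_shorten_list ints → Spec_shorten_list ints (shorten_list ints)

-- ===== LEMMAS AND PROOFS =====


def pvR (pre rest : List Int) : List Int :=
  match rest with
  | [] => []
  | x :: t => if pre.count x < 2 then x :: pvR (pre ++ [x]) t else pvR (pre ++ [x]) t

lemma pvCountApp (pre : List Int) (i x : Int) :
    (pre ++ [i]).count x = if i = x then pre.count x + 1 else pre.count x := by
  by_cases h : i = x
  · subst h; simp
  · simp [List.count_append, h]

lemma pvAddContains (so : PySem.Set Int) (i x : Int) :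
    (so.add i).contains x = true ↔ so.contains x = true ∨ x = i := by
  constructor
  · intro h
    rcases (PySem.Set.mem_add so i x).mp (by simpa [PySem.Set.contains] using h) with h | h
    · exact Or.inl (by simpa [PySem.Set.contains] using h)
    · exact Or.inr h
  · intro h
    have hm : x ∈ so ∨ x = i := by
      rcases h with h | h
      · exact Or.inl (by simpa [PySem.Set.contains] using h)
      · exact Or.inr h
    simpa [PySem.Set.contains] using (PySem.Set.mem_add so i x).mpr hm

lemma foldA_eq (rest : List Int) : ∀ (pre : List Int) (so st2 : PySem.Set Int) (out : List Int),
    (∀ x, so.contains x = true ↔ 0 < pre.count x) →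
    (∀ x, st2.contains x = true ↔ 2 ≤ pre.count x) →
    (rest.foldl shorten_listStep (so, st2, out)).2.2 = out ++ pvR pre rest := by
  induction rest with
  | nil => intro pre so st2 out _ _; simp [pvR]
  | cons i t ih =>
    intro pre so st2 out h1 h2
    have h1' : ∀ x, (so.add i).contains x = true ↔ 0 < (pre ++ [i]).count x := by
      intro x
      rw [pvAddContains, h1, pvCountApp]
      by_cases he : i = x
      · subst he; simp
      · simp [he]; intro h; exact absurd h.symm he
    have h2' : ∀ x, (st2.add i).contains x = true ↔ (2 ≤ pre.count x ∨ x = i) := by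
      intro x; rw [pvAddContains, h2]
    by_cases hc0 : pre.count i = 0
    · have hso : ¬ so.contains i = true := by rw [h1]; omega
      have hso' : i ∉ so := fun h => hso (by simpa [PySem.Set.contains] using h)
      have hA : shorten_listStep (so, st2, out) i = (so.add i, st2, out ++ [i]) := by
        simp [shorten_listStep, hso']
      have hR : pvR pre (i :: t) = i :: pvR (pre ++ [i]) t := by
        simp only [pvR]; rw [if_pos (by omega)]
      simp only [List.foldl_cons, hA, hR]
      rw [ih (pre ++ [i]) _ _ _ h1' ?_]
      · simp
      · intro x
        rw [h2, pvCountApp]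
        by_cases he : i = x
        · subst he; rw [if_pos rfl]; omega
        · simp [he]
    · by_cases hc1 : pre.count i = 1
      · have hso : so.contains i = true := (h1 i).mpr (by omega)
        have hso' : i ∈ so := by simpa [PySem.Set.contains] using hso
        have hst : ¬ st2.contains i = true := by rw [h2]; omega
        have hst' : i ∉ st2 := fun h => hst (by simpa [PySem.Set.contains] using h)
        have hA : shorten_listStep (so, st2, out) i = (so, st2.add i, out ++ [i]) := by
          simp [shorten_listStep, hso', hst']
        have hR : pvR pre (i :: t) = i :: pvR (pre ++ [i]) t := by
          simp only [pvR]; rw [if_pos (by omega)]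
        simp only [List.foldl_cons, hA, hR]
        rw [ih (pre ++ [i]) _ _ _ ?_ ?_]
        · simp
        · intro x
          rw [h1, pvCountApp]
          by_cases he : i = x
          · subst he; rw [if_pos rfl]; omega
          · simp [he]
        · intro x
          rw [h2', pvCountApp]
          by_cases he : i = x
          · subst he; rw [if_pos rfl]; omega
          · simp [he]; intro h; exact absurd h.symm he
      · have hso : so.contains i = true := (h1 i).mpr (by omega)
        have hso' : i ∈ so := by simpa [PySem.Set.contains] using hso
        have hst : st2.contains i = true := (h2 i).mpr (by omega)
        have hst' : i ∈ st2 := by simpa [PySem.Set.contains] using hst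
        have hA : shorten_listStep (so, st2, out) i = (so, st2, out) := by
          simp [shorten_listStep, hso', hst']
        have hR : pvR pre (i :: t) = pvR (pre ++ [i]) t := by
          simp only [pvR]; rw [if_neg (by omega)]
        simp only [List.foldl_cons, hA, hR]
        refine ih (pre ++ [i]) _ _ _ ?_ ?_
        · intro x
          rw [h1, pvCountApp]
          by_cases he : i = x
          · subst he; rw [if_pos rfl]; omega
          · simp [he]
        · intro x
          rw [h2, pvCountApp]
          by_cases he : i = x
          · subst he; rw [if_pos rfl]; omega
          · simp [he]

lemma index_getD (l : List (Int × Int)) : ∀ (d : PySem.Dict Int (List Int)) (v : Int),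
    (l.foldl (fun d p => d.modify p.2 [] (fun l => l ++ [p.1])) d).getD v []
      = d.getD v [] ++ (l.filter (fun p => p.2 == v)).map Prod.fst := by
  induction l with
  | nil => intro d v; simp
  | cons p t ih =>
    intro d v
    simp only [List.foldl_cons, List.filter_cons]
    by_cases he : p.2 = v
    · have hb : (p.2 == v) = true := by simp [he]
      rw [ih, hb]
      simp [← he, PySem.Dict.getD_modify_self]
    · have hb : (p.2 == v) = false := by simp [he]
      rw [ih, hb]
      rw [PySem.Dict.getD_modify_of_ne]
      · simp
      · simpa using fun h => he h.symm

lemma filter_enum_len (pre : List Int) : ∀ (s x : Int),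
    ((PySem.List.enumerate pre s).filter (fun p => p.2 == x)).length = pre.count x := by
  induction pre with
  | nil => intro s x; simp [PySem.List.enumerate_nil]
  | cons y t ih =>
    intro s x
    rw [PySem.List.enumerate_cons, List.filter_cons]
    by_cases he : y = x
    · simp [he, ih]
    · have hb : ((s, y).2 == x) = false := by simp [he]
      rw [hb]
      simp [ih, he]

lemma filter_enum_fst_lt (pre : List Int) (x : Int) :
    ∀ p ∈ (PySem.List.enumerate pre 0).filter (fun q => q.2 == x), p.1 < (pre.length : Int) := by
  intro p hp
  have hm : p ∈ PySem.List.enumerate pre 0 := (List.mem_filter.mp hp).1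
  obtain ⟨k, hk, rfl⟩ := (PySem.List.mem_enumerate_iff _ _ _).mp hm
  simp
  omega

lemma mem_take2 (A0 B0 : List Int) (j : Int) (hA : ∀ a ∈ A0, a < j) :
    ((A0 ++ j :: B0).take 2).contains j = decide (A0.length < 2) := by
  match A0 with
  | [] => simp
  | [a] => simp
  | a :: b :: rest =>
    have ha : a < j := hA a (by simp)
    have hb : b < j := hA b (by simp)
    simp only [List.cons_append, List.take, List.contains_cons]
    simp
    omega

lemma foldB_eq (ints : List Int) (d : PySem.Dict Int (List Int))
    (hd : ∀ v, d.getD v [] =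
      ((PySem.List.enumerate ints 0).filter (fun p => p.2 == v)).map Prod.fst) :
    ∀ (rest : List Int), ∀ (pre out : List Int), ints = pre ++ rest →
    ((PySem.List.enumerate rest (pre.length : Int)).foldl
      (fun out p =>
        if (PySem.List.slice (d.getD p.2 []) none (some 2)).contains p.1 then out ++ [p.2]
        else out) out) = out ++ pvR pre rest := by
  intro rest
  induction rest with
  | nil => intro pre out _; simp [PySem.List.enumerate_nil, pvR]
  | cons x t ih =>
    intro pre out hsplit
    rw [PySem.List.enumerate_cons]
    have hocc : d.getD x [] =
        ((PySem.List.enumerate pre 0).filter (fun p => p.2 == x)).map Prod.fst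
          ++ (pre.length : Int)
          :: ((PySem.List.enumerate t ((pre.length : Int) + 1)).filter
                (fun p => p.2 == x)).map Prod.fst := by
      rw [hd x, hsplit, PySem.List.enumerate_append, List.filter_append, List.map_append,
        PySem.List.enumerate_cons, List.filter_cons]
      simp
    have htest : (PySem.List.slice (d.getD x []) none (some 2)).contains (pre.length : Int)
        = decide (pre.count x < 2) := by
      have h2 : PySem.List.slice (d.getD x []) none (some 2) = (d.getD x []).take 2 := by
        have := PySem.List.slice_to_natCast (d.getD x []) 2
        simpa using this
      rw [h2, hocc, mem_take2 _ _ _ ?_]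
      · rw [← filter_enum_len pre 0 x]
        simp
      · intro a ha
        obtain ⟨p, hp, rfl⟩ := List.mem_map.mp ha
        exact filter_enum_fst_lt pre x p hp
    simp only [List.foldl_cons, htest]
    have hnext : ints = (pre ++ [x]) ++ t := by simpa using hsplit
    have hlen : ((pre.length : Int) + 1) = (((pre ++ [x]).length : Nat) : Int) := by
      simp
    by_cases hc : pre.count x < 2
    · have hR : pvR pre (x :: t) = x :: pvR (pre ++ [x]) t := by
        simp only [pvR]; rw [if_pos hc]
      rw [hR]
      simp only [decide_eq_true hc, if_true]
      rw [hlen, ih (pre ++ [x]) (out ++ [x]) hnext]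
      simp
    · have hR : pvR pre (x :: t) = pvR (pre ++ [x]) t := by
        simp only [pvR]; rw [if_neg hc]
      rw [hR]
      have hcf : (decide (pre.count x < 2)) = false := by simp [hc]
      simp only [hcf, Bool.false_eq_true, if_false]
      rw [hlen, ih (pre ++ [x]) out hnext]

-- ===== VERDICT (by name: the statement is the Claim_ definition above) =====
theorem shorten_list_spec : Claim_equal_shorten_list := by
  intro ints _
  unfold Spec_shorten_list
  have hA : shorten_list ints = pvR [] ints := by
    unfold shorten_list
    rw [foldA_eq ints [] PySem.Set.empty PySem.Set.empty []] <;>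
      simp [PySem.Set.empty, PySem.Set.contains]
  have hB : shorten_list_alt ints = pvR [] ints := by
    unfold shorten_list_alt
    have hd : ∀ v, (shorten_listAltIndex ints).getD v [] =
        ((PySem.List.enumerate ints 0).filter (fun p => p.2 == v)).map Prod.fst := by
      intro v
      unfold shorten_listAltIndex
      rw [index_getD]
      simp
    have := foldB_eq ints (shorten_listAltIndex ints) hd ints [] [] (by simp)
    simpa [PySem.List.enumerate] using this
  rw [hA, hB]
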